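-- pv_equiv track=rewrite | github.com/bnediction/reprogramming-with-bonesis | to-biorxiv/filters.py | parse_maketitle_mdcell
-- ===== SOURCE A (Python) =====
-- def parse_maketitle_mdcell(input):
--     data = {
--         "addresses": [],
--         "abstract": [],
--     }
--     state = 0
--     for line in input.strip().split("\n"):
--         line = line.strip()
--         # 0. Title
--         if state == 0 and line.startswith("# "):
--             data["title"] = line[2:].strip()
--             state = 1
--         # 1. Authors
--         elif state == 1 and line:
--             line = line.replace("<sup>", "\\,$^{")
--             line = line.replace("</sup>", "}$")
--             data["authors"] = line
--             state = 2
--         # 2. Affiliation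
--         elif state == 2 and line.startswith("> "):
--             line = line[2:].replace("<sup>", "$^{").replace("</sup> ", "}$")
--             data["addresses"].append(line)
--         elif state == 2 and not line:
--             state = 3
--         # 3,4. Abstract
--         elif state == 3 and line == "#### Abstract":
--             state = 4
--         elif state == 4 and line.startswith("**Keywords**:"):
--             data["keywords"] = line.split(":")[1].replace("*","").strip()
--             state = 5
--             break
--         elif state == 4 and line.startswith("> "):
--             data["abstract"].append(line[2:].strip())
--
--
--     data["addresses"] = "\\\\\n".join(data["addresses"])
--     data["abstract"] = "\n".join(data["abstract"])
--     return data
-- ===== SOURCE B (Python) =====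
-- def parse_maketitle_mdcell(input):
--     lines = input.strip().split("\n")
--     n = len(lines)
--     i = 0
--     title = authors = keywords = None
--     addresses = []
--     abstract = []
--     # phase 0: scan for the title line
--     while i < n and not lines[i].strip().startswith("# "):
--         i += 1
--     if i < n:
--         title = lines[i].strip()[2:].strip()
--         i += 1
--         # phase 1: first non-blank line = authors
--         while i < n and not lines[i].strip():
--             i += 1
--         if i < n:
--             authors = lines[i].strip().replace("<sup>", "\\,$^{").replace("</sup>", "}$")
--             i += 1
--             # phase 2: affiliation block, ends at the first blank line
--             while i < n:
--                 line = lines[i].strip()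
--                 i += 1
--                 if line.startswith("> "):
--                     addresses.append(line[2:].replace("<sup>", "$^{").replace("</sup> ", "}$"))
--                 elif not line:
--                     break
--             # phase 3: scan for the abstract marker
--             while i < n and lines[i].strip() != "#### Abstract":
--                 i += 1
--             i += 1
--             # phase 4: abstract block, keywords line ends everything
--             while i < n:
--                 line = lines[i].strip()
--                 i += 1
--                 if line.startswith("**Keywords**:"):
--                     keywords = line.split(":")[1].replace("*", "").strip()
--                     break
--                 if line.startswith("> "):
--                     abstract.append(line[2:].strip())
--     data = {"addresses": "\\\\\n".join(addresses), "abstract": "\n".join(abstract)}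
--     if title is not None:
--         data["title"] = title
--     if authors is not None:
--         data["authors"] = authors
--     if keywords is not None:
--         data["keywords"] = keywords
--     return data
-- ===== Notes on version B (the rewrite author's own statement) =====
-- stated objective: simpler
-- what changed: Replaces A's single loop over an integer state variable with an explicit index advancing through five sequential parsing phases (find title, find authors, collect affiliations, find the abstract marker, collect abstract/keywords), each phase skipping non-matching lines.
import Mathlib
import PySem

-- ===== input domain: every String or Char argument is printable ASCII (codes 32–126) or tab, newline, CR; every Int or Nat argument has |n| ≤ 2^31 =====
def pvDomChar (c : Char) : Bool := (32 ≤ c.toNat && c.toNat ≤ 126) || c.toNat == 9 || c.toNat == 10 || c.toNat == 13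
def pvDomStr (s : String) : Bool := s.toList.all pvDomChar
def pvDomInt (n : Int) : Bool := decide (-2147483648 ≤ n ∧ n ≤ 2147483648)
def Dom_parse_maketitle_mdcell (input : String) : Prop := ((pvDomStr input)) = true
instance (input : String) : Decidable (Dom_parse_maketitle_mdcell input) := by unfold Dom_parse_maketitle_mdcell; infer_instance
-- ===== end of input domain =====

-- B replaces A's integer state machine by an explicit sequence of parsing phases (scan for title,
-- scan for authors, collect affiliations, scan for the abstract marker, collect abstract/keywords);
-- objective: simpler decomposition, same cost.

-- ===== PORT A =====

/-- `s.split(sep)` with a non-empty literal separator: `split?` is `none` only for `sep = ""`,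
    so the default is unreachable at both call sites ("\n", ":"). -/
def pySplit (s sep : String) : List String := (PySem.Str.split? s sep).getD []

/-- The mutable dict of A: `addresses`/`abstract` are the accumulating lists; the other keys are
    `none` until first assigned (Python dict insertion order is rebuilt at the end, which is fixed
    here because A can only ever assign title, then authors, then keywords, in that order). -/
structure PData where
  addresses : List String
  abstract : List String
  title : Option String
  authors : Option String
  keywords : Option String

/-- A's `for` loop: one recursive step per line, carrying the integer `state`; the `break` in the
    keywords branch returns without recursing. -/
def loopA : List String → Nat → PData → PData
  | [], _, d => d
  | line :: rest, state, d =>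
    let line := PySem.Str.strip line
    if state == 0 && PySem.Str.startswith line "# " then
      loopA rest 1 { d with title := some (PySem.Str.strip (PySem.Str.slice line (some 2) none)) }
    else if state == 1 && !(line == "") then
      let line := PySem.Str.replace line "<sup>" "\\,$^{"
      let line := PySem.Str.replace line "</sup>" "}$"
      loopA rest 2 { d with authors := some line }
    else if state == 2 && PySem.Str.startswith line "> " then
      let line := PySem.Str.replace (PySem.Str.replace (PySem.Str.slice line (some 2) none) "<sup>" "$^{") "</sup> " "}$"
      loopA rest 2 { d with addresses := d.addresses ++ [line] }
    else if state == 2 && line == "" then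
      loopA rest 3 d
    else if state == 3 && line == "#### Abstract" then
      loopA rest 4 d
    else if state == 4 && PySem.Str.startswith line "**Keywords**:" then
      -- `line.split(":")[1]`: the guard guarantees ":" occurs, so index 1 exists; `getD` default unreachable
      { d with keywords := some (PySem.Str.strip (PySem.Str.replace ((pySplit line ":").getD 1 "") "*" "")) }
    else if state == 4 && PySem.Str.startswith line "> " then
      loopA rest 4 { d with abstract := d.abstract ++ [PySem.Str.strip (PySem.Str.slice line (some 2) none)] }
    else
      loopA rest state d

def parse_maketitle_mdcell (input : String) : List (String × String) :=
  let d := loopA (pySplit (PySem.Str.strip input) "\n") 0 ⟨[], [], none, none, none⟩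
  [("addresses", PySem.Str.join "\\\\\n" d.addresses), ("abstract", PySem.Str.join "\n" d.abstract)]
    ++ (match d.title with | some t => [("title", t)] | none => [])
    ++ (match d.authors with | some a => [("authors", a)] | none => [])
    ++ (match d.keywords with | some k => [("keywords", k)] | none => [])

-- ===== PORT B =====

/-- phase 0: advance past lines until one (stripped) starts with "# "; return title and remaining lines. -/
def findTitle : List String → Option (String × List String)
  | [] => none
  | l :: ls =>
    let line := PySem.Str.strip l
    if PySem.Str.startswith line "# " then
      some (PySem.Str.strip (PySem.Str.slice line (some 2) none), ls)
    else findTitle ls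

/-- phase 1: advance past blank lines to the authors line. -/
def findAuthors : List String → Option (String × List String)
  | [] => none
  | l :: ls =>
    let line := PySem.Str.strip l
    if line == "" then findAuthors ls
    else some (PySem.Str.replace (PySem.Str.replace line "<sup>" "\\,$^{") "</sup>" "}$", ls)

/-- phase 2: collect "> " affiliation lines, skipping others, until a blank line (consumed). -/
def takeAddrs : List String → List String × List String
  | [] => ([], [])
  | l :: ls =>
    let line := PySem.Str.strip l
    if PySem.Str.startswith line "> " then
      let (as, r) := takeAddrs ls
      (PySem.Str.replace (PySem.Str.replace (PySem.Str.slice line (some 2) none) "<sup>" "$^{") "</sup> " "}$" :: as, r)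
    else if line == "" then ([], ls)
    else takeAddrs ls

/-- phase 3: advance to just past the "#### Abstract" marker line. -/
def findMark : List String → List String
  | [] => []
  | l :: ls => if PySem.Str.strip l == "#### Abstract" then ls else findMark ls

/-- phase 4: collect "> " abstract lines (skipping others); a "**Keywords**:" line yields the
    keywords and stops everything. -/
def takeAbstract : List String → List String × Option String
  | [] => ([], none)
  | l :: ls =>
    let line := PySem.Str.strip l
    if PySem.Str.startswith line "**Keywords**:" then
      ([], some (PySem.Str.strip (PySem.Str.replace ((pySplit line ":").getD 1 "") "*" "")))
    else if PySem.Str.startswith line "> " then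
      let (as, k) := takeAbstract ls
      (PySem.Str.strip (PySem.Str.slice line (some 2) none) :: as, k)
    else takeAbstract ls

def parse_maketitle_mdcell_alt (input : String) : List (String × String) :=
  let lines := pySplit (PySem.Str.strip input) "\n"
  let (title, authors, addresses, abstract, keywords) :=
    match findTitle lines with
    | none => ((none : Option String), (none : Option String), ([] : List String), ([] : List String), (none : Option String))
    | some (t, r1) =>
      match findAuthors r1 with
      | none => (some t, none, [], [], none)
      | some (a, r2) =>
        let (addrs, r3) := takeAddrs r2
        let (abs, kw) := takeAbstract (findMark r3)
        (some t, some a, addrs, abs, kw)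
  [("addresses", PySem.Str.join "\\\\\n" addresses), ("abstract", PySem.Str.join "\n" abstract)]
    ++ (match title with | some t => [("title", t)] | none => [])
    ++ (match authors with | some a => [("authors", a)] | none => [])
    ++ (match keywords with | some k => [("keywords", k)] | none => [])

-- ===== PRECONDITION & SPEC =====
def Spec_parse_maketitle_mdcell (input : String) (out : List (String × String)) : Prop := out = parse_maketitle_mdcell_alt input
instance (input : String) (out : List (String × String)) : Decidable (Spec_parse_maketitle_mdcell input out) := by unfold Spec_parse_maketitle_mdcell; infer_instance

-- ===== CLAIM (what is proved, stated in full; the proofs are below) =====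
def Claim_equal_parse_maketitle_mdcell : Prop := ∀ (input : String), Dom_parse_maketitle_mdcell input → Spec_parse_maketitle_mdcell input (parse_maketitle_mdcell input)

-- ===== LEMMAS AND PROOFS =====

lemma loopA_state4 (ls : List String) (d : PData) :
    loopA ls 4 d =
      { d with abstract := d.abstract ++ (takeAbstract ls).1,
               keywords := match (takeAbstract ls).2 with | some s => some s | none => d.keywords } := by
  induction ls generalizing d with
  | nil => simp [loopA, takeAbstract]
  | cons l ls ih =>
    simp only [loopA, takeAbstract]
    split_ifs with h1 h2 <;> simp_all [List.append_assoc]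

lemma loopA_state3 (ls : List String) (d : PData) :
    loopA ls 3 d = loopA (findMark ls) 4 d := by
  induction ls generalizing d with
  | nil => simp [loopA, findMark]
  | cons l ls ih =>
    simp only [loopA, findMark]
    split_ifs with h1 <;> simp_all

lemma loopA_state2 (ls : List String) (d : PData) :
    loopA ls 2 d = loopA (takeAddrs ls).2 3 { d with addresses := d.addresses ++ (takeAddrs ls).1 } := by
  induction ls generalizing d with
  | nil => simp [loopA, takeAddrs]
  | cons l ls ih =>
    simp only [loopA, takeAddrs]
    split_ifs with h1 h2 <;> simp_all [List.append_assoc, PySem.Chars.startswith]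

lemma loopA_state1 (ls : List String) (d : PData) :
    loopA ls 1 d =
      match findAuthors ls with
      | none => d
      | some (a, r) => loopA r 2 { d with authors := some a } := by
  induction ls generalizing d with
  | nil => simp [loopA, findAuthors]
  | cons l ls ih =>
    simp only [loopA, findAuthors]
    split_ifs with h1 <;> simp_all

lemma loopA_state0 (ls : List String) (d : PData) :
    loopA ls 0 d =
      match findTitle ls with
      | none => d
      | some (t, r) => loopA r 1 { d with title := some t } := by
  induction ls generalizing d with
  | nil => simp [loopA, findTitle]
  | cons l ls ih =>
    simp only [loopA, findTitle]
    split_ifs with h1 <;> simp_all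

-- ===== VERDICT (by name: the statement is the Claim_ definition above) =====
theorem parse_maketitle_mdcell_spec : Claim_equal_parse_maketitle_mdcell := by
  intro input _
  unfold Spec_parse_maketitle_mdcell parse_maketitle_mdcell parse_maketitle_mdcell_alt
  simp only [loopA_state0]
  cases hT : findTitle (pySplit (PySem.Str.strip input) "\n") with
  | none => rfl
  | some p =>
    obtain ⟨t, r1⟩ := p
    simp only [loopA_state1]
    cases hA : findAuthors r1 with
    | none => rfl
    | some q =>
      obtain ⟨a, r2⟩ := q
      simp only [loopA_state2, loopA_state3, loopA_state4]
      cases hK : (takeAbstract (findMark (takeAddrs r2).2)).2 <;> rfl
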